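-- pv_equiv track=rewrite | github.com/paiml/depyler | examples/hard_crypto_hash.py | bloom_filter_ops
-- ===== SOURCE A (Python) =====
-- from typing import Dict, List, Optional, Tuple
--
-- def djb2_hash(data: str) -> int:
--     """DJB2 hash function by Dan Bernstein."""
--     h: int = 5381
--     for ch in data:
--         h = ((h << 5) + h) + ord(ch)
--         h = h & 0xFFFFFFFF
--     return h
--
-- def fnv1a_hash(data: str) -> int:
--     """FNV-1a hash function with 32-bit offset basis and prime."""
--     offset_basis: int = 2166136261
--     fnv_prime: int = 16777619
--     h: int = offset_basis
--     for ch in data: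
--         h = h ^ ord(ch)
--         h = (h * fnv_prime) & 0xFFFFFFFF
--     return h
--
-- def jenkins_one_at_a_time(data: str) -> int:
--     """Jenkins one-at-a-time hash function."""
--     h: int = 0
--     for ch in data:
--         h = (h + ord(ch)) & 0xFFFFFFFF
--         h = (h + (h << 10)) & 0xFFFFFFFF
--         h = (h ^ (h >> 6)) & 0xFFFFFFFF
--     h = (h + (h << 3)) & 0xFFFFFFFF
--     h = (h ^ (h >> 11)) & 0xFFFFFFFF
--     h = (h + (h << 15)) & 0xFFFFFFFF
--     return h
--
-- def bloom_filter_ops(size: int, items: List[str],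
--                      query: str) -> Tuple[List[int], bool]:
--     """Create bloom filter, insert items, then query for membership."""
--     bf: List[int] = []
--     for i in range(size):
--         bf.append(0)
--     for item in items:
--         h1: int = djb2_hash(item) % size
--         h2: int = fnv1a_hash(item) % size
--         h3: int = jenkins_one_at_a_time(item) % size
--         bf[h1] = 1
--         bf[h2] = 1
--         bf[h3] = 1
--     q1: int = djb2_hash(query) % size
--     q2: int = fnv1a_hash(query) % size
--     q3: int = jenkins_one_at_a_time(query) % size
--     found: bool = bf[q1] == 1 and bf[q2] == 1 and bf[q3] == 1
--     return (bf, found)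
-- ===== SOURCE B (Python) =====
-- from typing import Dict, List, Optional, Tuple
--
-- def djb2_hash(data: str) -> int:
--     h: int = 5381
--     for ch in data:
--         h = ((h << 5) + h) + ord(ch)
--         h = h & 0xFFFFFFFF
--     return h
--
-- def fnv1a_hash(data: str) -> int:
--     offset_basis: int = 2166136261
--     fnv_prime: int = 16777619
--     h: int = offset_basis
--     for ch in data:
--         h = h ^ ord(ch)
--         h = (h * fnv_prime) & 0xFFFFFFFF
--     return h
--
-- def jenkins_one_at_a_time(data: str) -> int:
--     h: int = 0
--     for ch in data:
--         h = (h + ord(ch)) & 0xFFFFFFFF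
--         h = (h + (h << 10)) & 0xFFFFFFFF
--         h = (h ^ (h >> 6)) & 0xFFFFFFFF
--     h = (h + (h << 3)) & 0xFFFFFFFF
--     h = (h ^ (h >> 11)) & 0xFFFFFFFF
--     h = (h + (h << 15)) & 0xFFFFFFFF
--     return h
--
-- def _bsearch(a: List[int], x: int) -> bool:
--     """Binary search for x in the sorted list a."""
--     lo, hi = 0, len(a)
--     while lo < hi:
--         mid = (lo + hi) // 2
--         if a[mid] < x:
--             lo = mid + 1
--         else:
--             hi = mid
--     return lo < len(a) and a[lo] == x
--
-- def bloom_filter_ops(size: int, items: List[str],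
--                      query: str) -> Tuple[List[int], bool]:
--     marks = set()
--     for item in items:
--         marks.add(djb2_hash(item) % size)
--         marks.add(fnv1a_hash(item) % size)
--         marks.add(jenkins_one_at_a_time(item) % size)
--     pos = sorted(marks)
--     # emit the bit list as zero-runs between consecutive set positions
--     bf: List[int] = []
--     prev = 0
--     for p in pos:
--         bf.extend([0] * (p - prev))
--         bf.append(1)
--         prev = p + 1
--     bf.extend([0] * (size - prev))
--     found = (_bsearch(pos, djb2_hash(query) % size)
--              and _bsearch(pos, fnv1a_hash(query) % size)
--              and _bsearch(pos, jenkins_one_at_a_time(query) % size))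
--     return (bf, found)
-- ===== Notes on version B (the rewrite author's own statement) =====
-- stated objective: alternative
-- what changed: B collects the distinct hash positions, SORTS them, builds the bit list by emitting zero-runs between consecutive sorted positions (run-length construction instead of allocating and mutating a bit array), and answers the query with a hand-written binary search over the sorted position list instead of indexing the array.
import Mathlib
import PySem

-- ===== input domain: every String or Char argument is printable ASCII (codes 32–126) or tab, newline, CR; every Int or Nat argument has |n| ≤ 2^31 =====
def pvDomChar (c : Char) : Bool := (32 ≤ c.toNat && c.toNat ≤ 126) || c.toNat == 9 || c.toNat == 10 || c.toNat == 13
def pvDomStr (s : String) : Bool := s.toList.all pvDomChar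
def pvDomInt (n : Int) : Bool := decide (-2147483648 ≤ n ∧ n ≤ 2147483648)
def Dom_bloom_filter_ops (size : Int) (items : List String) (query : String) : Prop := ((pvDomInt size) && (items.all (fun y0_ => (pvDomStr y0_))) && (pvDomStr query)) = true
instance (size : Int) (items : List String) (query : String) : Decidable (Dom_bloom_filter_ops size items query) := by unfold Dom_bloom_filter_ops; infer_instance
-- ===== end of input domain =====

-- B sorts the distinct hash positions, builds the bit list by emitting zero-runs
-- between consecutive sorted positions, and answers the query by binary search
-- over the sorted position list (alternative algorithm; similar cost).


-- ===== PORT A =====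
-- module-level hash helpers (shared, verbatim, by both ports)
def djb2_hash (data : String) : Int :=
  data.toList.foldl (fun h c =>
    PySem.Int.band (((h <<< (5:Nat)) + h) + (c.toNat : Int)) 0xFFFFFFFF) 5381

def fnv1a_hash (data : String) : Int :=
  data.toList.foldl (fun h c =>
    PySem.Int.band ((PySem.Int.bxor h (c.toNat : Int)) * 16777619) 0xFFFFFFFF) 2166136261

def jenkins_one_at_a_time (data : String) : Int :=
  let h := data.toList.foldl (fun h c =>
    let h := PySem.Int.band (h + (c.toNat : Int)) 0xFFFFFFFF
    let h := PySem.Int.band (h + (h <<< (10:Nat))) 0xFFFFFFFF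
    PySem.Int.band (PySem.Int.bxor h (h >>> (6:Nat))) 0xFFFFFFFF) 0
  let h := PySem.Int.band (h + (h <<< (3:Nat))) 0xFFFFFFFF
  let h := PySem.Int.band (PySem.Int.bxor h (h >>> (11:Nat))) 0xFFFFFFFF
  PySem.Int.band (h + (h <<< (15:Nat))) 0xFFFFFFFF

def bloom_filter_ops (size : Int) (items : List String) (query : String) : List Int × Bool :=
  let bf : List Int := (PySem.List.pyRange 0 size 1).foldl (fun bf _ => bf ++ [(0:Int)]) []
  let bf : List Int := items.foldl (fun bf item =>
    let h1 := PySem.Int.mod (djb2_hash item) size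
    let h2 := PySem.Int.mod (fnv1a_hash item) size
    let h3 := PySem.Int.mod (jenkins_one_at_a_time item) size
    let bf := PySem.List.pySetD bf h1 1
    let bf := PySem.List.pySetD bf h2 1
    PySem.List.pySetD bf h3 1) bf
  let q1 := PySem.Int.mod (djb2_hash query) size
  let q2 := PySem.Int.mod (fnv1a_hash query) size
  let q3 := PySem.Int.mod (jenkins_one_at_a_time query) size
  let found : Bool :=
    (PySem.List.pyGetD bf q1 0 == 1) && (PySem.List.pyGetD bf q2 0 == 1)
      && (PySem.List.pyGetD bf q3 0 == 1)
  (bf, found)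

-- ===== PORT B =====
-- _bsearch's while loop: lo and hi stay in [0, len(a)], so Nat state is exact
-- ((lo+hi)//2 on nonnegative ints is Nat division).
-- the loop is run with fuel = hi - lo (each iteration strictly shrinks [lo, hi),
-- so the fuel never runs out); structural recursion on the fuel
def pvBsLoop (a : List Int) (x : Int) : Nat → Nat → Nat → Nat
  | 0, lo, _hi => lo
  | fuel + 1, lo, hi =>
    if lo < hi then
      if a.getD ((lo + hi) / 2) 0 < x then pvBsLoop a x fuel ((lo + hi) / 2 + 1) hi
      else pvBsLoop a x fuel lo ((lo + hi) / 2)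
    else lo

def pvBsearch (a : List Int) (x : Int) : Bool :=
  let lo := pvBsLoop a x a.length 0 a.length
  decide (lo < a.length) && (a.getD lo 0 == x)

def bloom_filter_ops_alt (size : Int) (items : List String) (query : String) : List Int × Bool :=
  let marks : PySem.Set Int := items.foldl (fun s item =>
    let s := PySem.Set.add s (PySem.Int.mod (djb2_hash item) size)
    let s := PySem.Set.add s (PySem.Int.mod (fnv1a_hash item) size)
    PySem.Set.add s (PySem.Int.mod (jenkins_one_at_a_time item) size)) PySem.Set.empty
  let pos : List Int := PySem.List.sorted marks (fun x => x) false
  let st : List Int × Int := pos.foldl (fun st p =>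
    (st.1 ++ PySem.List.pyRepeat [(0:Int)] (p - st.2) ++ [(1:Int)], p + 1)) ([], 0)
  let bf : List Int := st.1 ++ PySem.List.pyRepeat [(0:Int)] (size - st.2)
  let found : Bool :=
    pvBsearch pos (PySem.Int.mod (djb2_hash query) size)
      && pvBsearch pos (PySem.Int.mod (fnv1a_hash query) size)
      && pvBsearch pos (PySem.Int.mod (jenkins_one_at_a_time query) size)
  (bf, found)

-- ===== PRECONDITION & SPEC =====
-- Pre_ excludes size ≤ 0, exactly where Python A raises (ZeroDivisionError at size = 0,
-- IndexError for size < 0: the bit array is empty but indices are still assigned/read).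
def Pre_bloom_filter_ops (size : Int) (items : List String) (query : String) : Prop := 0 < size
instance (size : Int) (items : List String) (query : String) : Decidable (Pre_bloom_filter_ops size items query) := by unfold Pre_bloom_filter_ops; infer_instance
def pvWitness_bloom_filter_ops : Int × List String × String := (3, ["a", "b"], "a")

def Spec_bloom_filter_ops (size : Int) (items : List String) (query : String) (out : List Int × Bool) : Prop := out = bloom_filter_ops_alt size items query
instance (size : Int) (items : List String) (query : String) (out : List Int × Bool) : Decidable (Spec_bloom_filter_ops size items query out) := by unfold Spec_bloom_filter_ops; infer_instance

-- ===== CLAIM (what is proved, stated in full; the proofs are below) =====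
def Claim_equal_bloom_filter_ops : Prop := ∀ (size : Int) (items : List String) (query : String), Dom_bloom_filter_ops size items query → Pre_bloom_filter_ops size items query → Spec_bloom_filter_ops size items query (bloom_filter_ops size items query)

-- ===== LEMMAS AND PROOFS =====

-- the 0/1 indicator list of a set of positions, over range(size)
def pvInd (size : Int) (s : PySem.Set Int) : List Int :=
  (PySem.List.pyRange 0 size 1).map (fun i => if PySem.Set.contains s i then (1:Int) else 0)

theorem pvInd_set (size : Int) (s : PySem.Set Int) (h : Int)
    (h0 : 0 ≤ h) (h1 : h < size) :
    PySem.List.pySetD (pvInd size s) h 1 = pvInd size (PySem.Set.add s h) := by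
  unfold pvInd
  rw [PySem.List.pySetD_of_nonneg _ _ h0]
  apply List.ext_getElem
  · simp
  · intro i hi1 hi2
    have hilt : (i:Int) < size := by
      rw [List.length_map, PySem.List.length_pyRange_one] at hi2; omega
    simp only [List.getElem_set, List.getElem_map, PySem.List.getElem_pyRange_one]
    by_cases hih : i = h.toNat
    · subst hih
      have hz : ((h.toNat : Nat) : Int) = h := by omega
      simp [hz, PySem.Set.mem_add]
    · have hne : (i : Int) ≠ h := by omega
      rw [if_neg (Ne.symm hih)]
      simp [PySem.Set.mem_add, hne]

theorem pvInd_get (size : Int) (s : PySem.Set Int) (q : Int)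
    (h0 : 0 ≤ q) (h1 : q < size) :
    (PySem.List.pyGetD (pvInd size s) q 0 == 1) = PySem.Set.contains s q := by
  unfold pvInd
  have hs : size = ((size.toNat : Nat) : Int) := by omega
  have hq' : ((q.toNat : Nat) : Int) = q := by omega
  rw [hs, ← hq', PySem.List.pyGetD_map_pyRange _ _ _ _ (by omega)]
  cases hc : PySem.Set.contains s (((q.toNat : Nat)) : Int) <;> simp

theorem pvInd_loop (size : Int) (hsz : 0 < size) (items : List String) (s : PySem.Set Int) :
    items.foldl (fun bf item =>
      PySem.List.pySetD (PySem.List.pySetD (PySem.List.pySetD bf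
        (PySem.Int.mod (djb2_hash item) size) 1)
        (PySem.Int.mod (fnv1a_hash item) size) 1)
        (PySem.Int.mod (jenkins_one_at_a_time item) size) 1) (pvInd size s)
    = pvInd size (items.foldl (fun s item =>
        PySem.Set.add (PySem.Set.add (PySem.Set.add s
          (PySem.Int.mod (djb2_hash item) size))
          (PySem.Int.mod (fnv1a_hash item) size))
          (PySem.Int.mod (jenkins_one_at_a_time item) size)) s) := by
  induction items generalizing s with
  | nil => rfl
  | cons item rest ih =>
    simp only [List.foldl_cons]
    rw [pvInd_set _ _ _ (PySem.Int.mod_nonneg _ hsz) (PySem.Int.mod_lt _ hsz),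
        pvInd_set _ _ _ (PySem.Int.mod_nonneg _ hsz) (PySem.Int.mod_lt _ hsz),
        pvInd_set _ _ _ (PySem.Int.mod_nonneg _ hsz) (PySem.Int.mod_lt _ hsz)]
    exact ih _

theorem pvInd_empty (size : Int) :
    (PySem.List.pyRange 0 size 1).map (fun _ => (0:Int)) = pvInd size PySem.Set.empty := by
  unfold pvInd
  apply List.map_congr_left
  intro i _
  simp [PySem.Set.empty]

-- B's marks set is set(flat list of the three hash positions of every item)
def pvTri (size : Int) (item : String) : List Int :=
  [PySem.Int.mod (djb2_hash item) size, PySem.Int.mod (fnv1a_hash item) size,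
   PySem.Int.mod (jenkins_one_at_a_time item) size]

theorem pvMarks_eq_ofList (size : Int) (items : List String) :
    items.foldl (fun s item =>
      PySem.Set.add (PySem.Set.add (PySem.Set.add s
        (PySem.Int.mod (djb2_hash item) size))
        (PySem.Int.mod (fnv1a_hash item) size))
        (PySem.Int.mod (jenkins_one_at_a_time item) size)) PySem.Set.empty
    = PySem.Set.ofList (items.flatMap (pvTri size)) := by
  rw [PySem.Set.ofList_eq_foldl]
  have key : ∀ (l : List String) (s : List Int),
      l.foldl (fun s item =>
        PySem.Set.add (PySem.Set.add (PySem.Set.add s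
          (PySem.Int.mod (djb2_hash item) size))
          (PySem.Int.mod (fnv1a_hash item) size))
          (PySem.Int.mod (jenkins_one_at_a_time item) size)) s
      = (l.flatMap (pvTri size)).foldl PySem.Set.add s := by
    intro l
    induction l with
    | nil => intro s; rfl
    | cons a t ih => intro s; simp only [List.flatMap_cons, List.foldl_append, List.foldl_cons, pvTri]; exact ih _
  exact key items PySem.Set.empty

-- run-length construction over a strictly increasing position list = indicator map
theorem pvRuns (size : Int) (pos : List Int) (hp : pos.Pairwise (· < ·)) :
    ∀ (lo : Int) (acc : List Int), (∀ p ∈ pos, lo ≤ p ∧ p < size) →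
    (pos.foldl (fun st p =>
      (st.1 ++ PySem.List.pyRepeat [(0:Int)] (p - st.2) ++ [(1:Int)], p + 1)) (acc, lo)).1
      ++ PySem.List.pyRepeat [(0:Int)] (size -
        (pos.foldl (fun st p =>
          (st.1 ++ PySem.List.pyRepeat [(0:Int)] (p - st.2) ++ [(1:Int)], p + 1)) (acc, lo)).2)
    = acc ++ (PySem.List.pyRange lo size 1).map
        (fun i => if i ∈ pos then (1:Int) else 0) := by
  induction hp with
  | nil =>
    intro lo acc _
    simp only [List.foldl_nil, PySem.List.pyRepeat_singleton]
    congr 1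
    apply List.ext_getElem
    · simp [PySem.List.length_pyRange_one]
    · intro i h1 h2
      simp
  | @cons p rest hlt hrest ih =>
    intro lo acc hb
    obtain ⟨hlo, hsz⟩ := hb p List.mem_cons_self
    simp only [List.foldl_cons]
    rw [ih (p + 1) _ (fun q hq => ⟨by have := hlt q hq; omega, (hb q (List.mem_cons_of_mem _ hq)).2⟩)]
    rw [PySem.List.pyRange_one_append lo p size hlo (by omega),
        PySem.List.pyRange_one_cons hsz]
    have hz : (PySem.List.pyRange lo p 1).map (fun i => if i ∈ p :: rest then (1:Int) else 0)
        = PySem.List.pyRepeat [(0:Int)] (p - lo) := by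
      rw [PySem.List.pyRepeat_singleton]
      apply List.ext_getElem
      · simp [PySem.List.length_pyRange_one]
      · intro i h1 h2
        simp only [List.getElem_replicate, List.getElem_map, PySem.List.getElem_pyRange_one]
        have hlen : i < (p - lo).toNat := by simpa using h2
        have hnm : ¬ (lo + (i:Int) ∈ p :: rest) := by
          intro hmem
          rcases List.mem_cons.mp hmem with h | h
          · omega
          · have := hlt _ h; omega
        simp [hnm]
    have htail : (PySem.List.pyRange (p+1) size 1).map (fun i => if i ∈ p :: rest then (1:Int) else 0)
        = (PySem.List.pyRange (p+1) size 1).map (fun i => if i ∈ rest then (1:Int) else 0) := by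
      apply List.map_congr_left
      intro i hi
      have hgt : p < i := by have := PySem.List.mem_pyRange_one.mp hi; omega
      have hne : i ≠ p := by omega
      simp [List.mem_cons, hne]
    rw [List.map_append, List.map_cons, hz, htail]
    simp

-- binary-search loop invariant on a sorted list
theorem pvBsLoop_spec (a : List Int) (x : Int)
    (hp : a.Pairwise (· < ·)) :
    ∀ (n lo hi : Nat), hi - lo ≤ n → lo ≤ hi → hi ≤ a.length →
    (∀ j, j < lo → (hj : j < a.length) → a[j] < x) →
    (∀ j, hi ≤ j → (hj : j < a.length) → ¬ a[j] < x) →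
    (∀ j, j < pvBsLoop a x n lo hi → (hj : j < a.length) → a[j] < x) ∧
    (∀ j, pvBsLoop a x n lo hi ≤ j → (hj : j < a.length) → ¬ a[j] < x) ∧
    pvBsLoop a x n lo hi ≤ a.length := by
  have hmono : ∀ (i j : Nat) (hi : i < a.length) (hj : j < a.length), i ≤ j → a[i] ≤ a[j] := by
    intro i j hi hj hij
    rcases Nat.lt_or_ge i j with h | h
    · exact le_of_lt ((List.pairwise_iff_getElem.mp hp) i j hi hj h)
    · have : i = j := by omega
      subst this; exact le_refl _
  intro n
  induction n with
  | zero =>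
    intro lo hi hn hlh hhi hlow hhigh
    rw [pvBsLoop]
    refine ⟨hlow, ?_, by omega⟩
    intro j hj hjl
    exact hhigh j (by omega) hjl
  | succ n ih =>
    intro lo hi hn hlh hhi hlow hhigh
    by_cases hlt : lo < hi
    · rw [pvBsLoop, if_pos hlt]
      have hmlt : (lo + hi) / 2 < hi := by omega
      have hmla : (lo + hi) / 2 < a.length := by omega
      have hgd : a.getD ((lo + hi) / 2) 0 = a[(lo + hi) / 2] := List.getD_eq_getElem a 0 hmla
      by_cases hc : a.getD ((lo + hi) / 2) 0 < x
      · rw [if_pos hc]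
        exact ih ((lo + hi) / 2 + 1) hi (by omega) (by omega) hhi
          (fun j hj hjl => lt_of_le_of_lt (hmono j ((lo + hi) / 2) hjl hmla (by omega)) (hgd ▸ hc))
          hhigh
      · rw [if_neg hc]
        exact ih lo ((lo + hi) / 2) (by omega) (by omega) (by omega) hlow
          (fun j hj hjl h => hc (hgd ▸ lt_of_le_of_lt (hmono ((lo + hi) / 2) j hmla hjl hj) h))
    · rw [pvBsLoop, if_neg hlt]
      exact ⟨hlow, fun j hj hjl => hhigh j (by omega) hjl, by omega⟩

theorem pvBsearch_eq_mem (a : List Int) (x : Int) (hp : a.Pairwise (· < ·)) :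
    pvBsearch a x = decide (x ∈ a) := by
  obtain ⟨hlow, hhigh, hle⟩ :=
    pvBsLoop_spec a x hp a.length 0 a.length (by omega) (by omega) (le_refl _)
      (by omega) (by omega)
  have hunf : pvBsearch a x
      = (decide (pvBsLoop a x a.length 0 a.length < a.length)
          && (a.getD (pvBsLoop a x a.length 0 a.length) 0 == x)) := rfl
  rw [hunf]
  set r := pvBsLoop a x a.length 0 a.length with hr
  by_cases hmem : x ∈ a
  · obtain ⟨j, hj, hja⟩ := List.getElem_of_mem hmem
    have hjr : r ≤ j := by
      by_contra h
      exact absurd (hlow j (by omega) hj) (by rw [hja]; exact lt_irrefl x)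
    have hrl : r < a.length := by omega
    have hxr : ¬ a[r] < x := hhigh r (le_refl r) hrl
    have hax : a[r] = x := by
      have h1 : a[r] ≤ a[j] := by
        rcases Nat.lt_or_ge r j with h | h
        · exact le_of_lt ((List.pairwise_iff_getElem.mp hp) r j hrl hj h)
        · have : r = j := by omega
          subst this; exact le_refl _
      rw [hja] at h1; omega
    rw [List.getD_eq_getElem a 0 hrl, hax]
    simp [hrl, hmem]
  · simp only [hmem, decide_false]
    by_cases hrl : r < a.length
    · have : a[r] ≠ x := fun h => hmem (h ▸ List.getElem_mem hrl)
      rw [List.getD_eq_getElem a 0 hrl]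
      simp [this]
    · simp [hrl]

-- ===== VERDICT (by name: the statement is the Claim_ definition above) =====
theorem bloom_filter_ops_spec : Claim_equal_bloom_filter_ops := by
  intro size items query _ hpre
  have hsz : 0 < size := hpre
  unfold Spec_bloom_filter_ops
  simp only [bloom_filter_ops, bloom_filter_ops_alt]
  rw [PySem.List.foldl_append_singleton_eq_map (fun _ => (0:Int)), List.nil_append,
      pvInd_empty, pvInd_loop size hsz, pvMarks_eq_ofList]
  set flat := items.flatMap (pvTri size) with hflat
  set marks := PySem.Set.ofList flat with hmarks
  set pos := PySem.List.sorted marks (fun x => x) false with hpos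
  have hppos : pos.Pairwise (· < ·) := PySem.List.sorted_ofList_pairwise_lt flat
  have hmempos : ∀ i : Int, (i ∈ pos) ↔ (i ∈ marks) := by
    intro i; rw [hpos, PySem.List.mem_sorted]
  have hbnd : ∀ p ∈ pos, (0:Int) ≤ p ∧ p < size := by
    intro p hpmem
    have : p ∈ flat := (PySem.Set.mem_ofList flat p).mp ((hmempos p).mp hpmem)
    obtain ⟨item, _, hin⟩ := List.mem_flatMap.mp this
    simp only [pvTri, List.mem_cons] at hin
    rcases hin with h | h | h | h
    all_goals first
      | (subst h; exact ⟨PySem.Int.mod_nonneg _ hsz, PySem.Int.mod_lt _ hsz⟩)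
      | exact absurd h (by simp)
  have hbf : (pos.foldl (fun st p =>
        (st.1 ++ PySem.List.pyRepeat [(0:Int)] (p - st.2) ++ [(1:Int)], p + 1)) ([], 0)).1
      ++ PySem.List.pyRepeat [(0:Int)] (size -
        (pos.foldl (fun st p =>
          (st.1 ++ PySem.List.pyRepeat [(0:Int)] (p - st.2) ++ [(1:Int)], p + 1)) ([], 0)).2)
      = pvInd size marks := by
    rw [pvRuns size pos hppos 0 [] hbnd, List.nil_append]
    unfold pvInd
    apply List.map_congr_left
    intro i _
    by_cases h : i ∈ marks <;> simp [hmempos i, h]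
  have hfound : ∀ q : Int, 0 ≤ q → q < size →
      pvBsearch pos q = (PySem.List.pyGetD (pvInd size marks) q 0 == 1) := by
    intro q h0 h1
    rw [pvInd_get size marks q h0 h1, pvBsearch_eq_mem pos q hppos]
    by_cases h : q ∈ marks <;> simp [hmempos q, h]
  simp only [hbf]
  rw [hfound _ (PySem.Int.mod_nonneg _ hsz) (PySem.Int.mod_lt _ hsz),
      hfound _ (PySem.Int.mod_nonneg _ hsz) (PySem.Int.mod_lt _ hsz),
      hfound _ (PySem.Int.mod_nonneg _ hsz) (PySem.Int.mod_lt _ hsz)]
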